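-- pv_equiv track=rewrite | github.com/ryosuke-404/mot-tracker-bench | tracking/postprocess.py | apply_id_map
-- ===== SOURCE A (Python) =====
-- def apply_id_map(
--     track_birth: dict[int, int],
--     track_death: dict[int, int],
--     id_map: dict[int, int],
-- ) -> tuple[dict[int, int], dict[int, int]]:
--     """
--     Collapse track_birth / track_death according to id_map.
--     The merged track spans min(births) … max(deaths) of its group.
--     """
--     new_birth: dict[int, int] = {}
--     new_death: dict[int, int] = {}
--     for old_id, new_id in id_map.items():
--         b = track_birth.get(old_id, 0)
--         d = track_death.get(old_id, 0)
--         new_birth[new_id] = min(new_birth.get(new_id, b), b)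
--         new_death[new_id] = max(new_death.get(new_id, d), d)
--     # Pass through tracks not in id_map
--     for tid in track_birth:
--         if tid not in id_map:
--             new_birth[tid] = track_birth[tid]
--             new_death[tid] = track_death.get(tid, track_birth[tid])
--     return new_birth, new_death
-- ===== SOURCE B (Python) =====
-- def apply_id_map(track_birth, track_death, id_map):
--     # Collect each group's (birth, death) pairs, then reduce with min/max.
--     groups = {}
--     for old_id, new_id in id_map.items():
--         groups.setdefault(new_id, []).append(
--             (track_birth.get(old_id, 0), track_death.get(old_id, 0))
--         )
--     new_birth = {nid: min(b for b, _ in pairs) for nid, pairs in groups.items()}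
--     new_death = {nid: max(d for _, d in pairs) for nid, pairs in groups.items()}
--     # Pass through tracks not in id_map (runs last: overwrites any collision)
--     for tid, b in track_birth.items():
--         if tid not in id_map:
--             new_birth[tid] = b
--             new_death[tid] = track_death.get(tid, b)
--     return new_birth, new_death
-- ===== Notes on version B (the rewrite author's own statement) =====
-- stated objective: alternative
-- what changed: B collects each group's (birth, death) pairs into a per-new-id list (setdefault/append) and then reduces every group with min/max in separate dict comprehensions, instead of A's single loop maintaining running min/max scalars; the passthrough loop iterates items() instead of keys with indexing.
import Mathlib
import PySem

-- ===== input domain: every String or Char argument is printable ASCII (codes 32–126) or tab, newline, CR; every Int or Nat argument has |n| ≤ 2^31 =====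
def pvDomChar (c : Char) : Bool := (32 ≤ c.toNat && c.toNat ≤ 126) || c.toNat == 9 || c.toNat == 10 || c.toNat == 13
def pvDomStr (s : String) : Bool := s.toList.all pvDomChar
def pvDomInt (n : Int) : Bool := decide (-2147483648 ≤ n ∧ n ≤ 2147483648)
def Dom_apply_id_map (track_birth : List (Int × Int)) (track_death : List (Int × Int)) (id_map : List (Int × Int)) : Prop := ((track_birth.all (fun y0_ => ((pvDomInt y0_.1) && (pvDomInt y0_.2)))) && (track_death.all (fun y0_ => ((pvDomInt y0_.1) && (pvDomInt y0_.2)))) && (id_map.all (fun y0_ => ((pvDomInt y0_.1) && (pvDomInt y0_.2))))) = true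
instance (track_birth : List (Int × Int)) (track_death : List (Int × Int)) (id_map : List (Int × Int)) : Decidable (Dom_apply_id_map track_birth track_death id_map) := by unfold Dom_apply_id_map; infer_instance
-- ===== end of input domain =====

-- B: collect-then-reduce decomposition (group (birth,death) pairs per new id, then reduce with min/max) instead of A's running min/max scalars; same cost, different structure.

-- ===== PORT A =====
def apply_id_map (track_birth : List (Int × Int)) (track_death : List (Int × Int)) (id_map : List (Int × Int)) : (List (Int × Int)) × (List (Int × Int)) :=
  let tbd := PySem.Dict.ofList track_birth
  let tdd := PySem.Dict.ofList track_death
  let imd := PySem.Dict.ofList id_map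
  -- for old_id, new_id in id_map.items(): running min/max per new_id
  let s1 := imd.items.foldl
    (fun (s : PySem.Dict Int Int × PySem.Dict Int Int) p =>
      let b := tbd.getD p.1 0
      let d := tdd.getD p.1 0
      (s.1.insert p.2 (min (s.1.getD p.2 b) b),
       s.2.insert p.2 (max (s.2.getD p.2 d) d)))
    (PySem.Dict.empty, PySem.Dict.empty)
  -- for tid in track_birth: pass through tracks not in id_map
  -- (track_birth[tid] is ported as getD tid 0: tid is a key of track_birth, so the lookup cannot fail)
  let s2 := tbd.keys.foldl
    (fun (s : PySem.Dict Int Int × PySem.Dict Int Int) tid =>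
      if imd.contains tid then s
      else (s.1.insert tid (tbd.getD tid 0),
            s.2.insert tid (tdd.getD tid (tbd.getD tid 0))))
    s1
  (s2.1.items, s2.2.items)

-- ===== PORT B =====
def apply_id_map_alt (track_birth : List (Int × Int)) (track_death : List (Int × Int)) (id_map : List (Int × Int)) : (List (Int × Int)) × (List (Int × Int)) :=
  let tbd := PySem.Dict.ofList track_birth
  let tdd := PySem.Dict.ofList track_death
  let imd := PySem.Dict.ofList id_map
  -- groups.setdefault(new_id, []).append((b, d))  =  modify with default []
  let groups := imd.items.foldl
    (fun (g : PySem.Dict Int (List (Int × Int))) p =>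
      g.modify p.2 [] (fun ps => ps ++ [(tbd.getD p.1 0, tdd.getD p.1 0)]))
    PySem.Dict.empty
  -- dict comprehensions reducing each (nonempty) group; .getD 0 only makes min/max total
  let nb := groups.items.foldl
    (fun (d : PySem.Dict Int Int) q =>
      d.insert q.1 ((PySem.List.min? (q.2.map (fun r => r.1)) (fun y => y)).getD 0))
    PySem.Dict.empty
  let nd := groups.items.foldl
    (fun (d : PySem.Dict Int Int) q =>
      d.insert q.1 ((PySem.List.max? (q.2.map (fun r => r.2)) (fun y => y)).getD 0))
    PySem.Dict.empty
  -- for tid, b in track_birth.items(): pass through tracks not in id_map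
  let s2 := tbd.items.foldl
    (fun (s : PySem.Dict Int Int × PySem.Dict Int Int) p =>
      if imd.contains p.1 then s
      else (s.1.insert p.1 p.2, s.2.insert p.1 (tdd.getD p.1 p.2)))
    (nb, nd)
  (s2.1.items, s2.2.items)

-- ===== PRECONDITION & SPEC =====
def Spec_apply_id_map (track_birth : List (Int × Int)) (track_death : List (Int × Int)) (id_map : List (Int × Int)) (out : (List (Int × Int)) × (List (Int × Int))) : Prop := out = apply_id_map_alt track_birth track_death id_map
instance (track_birth : List (Int × Int)) (track_death : List (Int × Int)) (id_map : List (Int × Int)) (out : (List (Int × Int)) × (List (Int × Int))) : Decidable (Spec_apply_id_map track_birth track_death id_map out) := by unfold Spec_apply_id_map; infer_instance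

-- ===== CLAIM (what is proved, stated in full; the proofs are below) =====
def Claim_equal_apply_id_map : Prop := ∀ (track_birth : List (Int × Int)) (track_death : List (Int × Int)) (id_map : List (Int × Int)), Dom_apply_id_map track_birth track_death id_map → Spec_apply_id_map track_birth track_death id_map (apply_id_map track_birth track_death id_map)

-- ===== LEMMAS AND PROOFS =====
lemma foldl_pair {α β γ : Type} (l : List α) (f : β → α → β) (g : γ → α → γ) (a : β) (b : γ) :
    l.foldl (fun s p => (f s.1 p, g s.2 p)) (a, b) = (l.foldl f a, l.foldl g b) := by
  induction l generalizing a b with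
  | nil => rfl
  | cons x t ih => simpa using ih (f a x) (g b x)

-- get? of A's running-op loop = Option-fold over the group's values
lemma foldA_get? (op : Int → Int → Int) (vf : Int × Int → Int) (l : List (Int × Int))
    (d : PySem.Dict Int Int) (n : Int) :
    (l.foldl (fun d p => d.insert p.2 (op (d.getD p.2 (vf p)) (vf p))) d).get? n
      = ((l.filter (fun p => p.2 == n)).map vf).foldl
          (fun (o : Option Int) b => some (op (o.getD b) b)) (d.get? n) := by
  induction l generalizing d with
  | nil => rfl
  | cons x t ih =>
    simp only [List.foldl_cons, List.filter_cons]
    by_cases h : x.2 = n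
    · have hb : (x.2 == n) = true := by simpa using h
      simp only [hb, if_true, List.map_cons, List.foldl_cons]
      rw [ih]
      simp [h, PySem.Dict.getD_eq_get?_getD]
    · have hb : (x.2 == n) = false := by simpa using h
      rw [ih]
      simp only [hb, if_false, Bool.false_eq_true]
      rw [PySem.Dict.get?_insert]
      simp [Ne.symm h]

lemma optfold (op : Int → Int → Int) (bs : List Int) (a : Int) :
    bs.foldl (fun (o : Option Int) b => some (op (o.getD b) b)) (some a)
      = some (bs.foldl op a) := by
  induction bs generalizing a with
  | nil => rfl
  | cons x t ih => simpa using ih (op a x)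

lemma optfold_none (op : Int → Int → Int) (hop : ∀ b, op b b = b) (b : Int) (bs : List Int) :
    (b :: bs).foldl (fun (o : Option Int) b => some (op (o.getD b) b)) none
      = some (bs.foldl op b) := by
  simp [List.foldl_cons, hop, optfold]

-- items are determined by keys and get? (given unique keys)
lemma items_eq_of (d d' : PySem.Dict Int Int) (hk : d.keys = d'.keys) (hn : d.keys.Nodup)
    (hv : ∀ k, d.get? k = d'.get? k) : d.items = d'.items := by
  have hn' : d'.keys.Nodup := hk ▸ hn
  have hkeys : d.items.map Prod.fst = d'.items.map Prod.fst := by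
    simpa [PySem.Dict.keys] using hk
  have hlen : d.items.length = d'.items.length := by
    have := congrArg List.length hkeys; simpa using this
  apply List.ext_getElem hlen
  intro i h1 h2
  have hfst : d.items[i].1 = d'.items[i].1 := by
    have h := congrArg (fun l => l[i]?) hkeys
    simp only [List.getElem?_map] at h
    rw [List.getElem?_eq_getElem h1, List.getElem?_eq_getElem h2] at h
    simpa using h
  have hm1 : (d.items[i].1, d.items[i].2) ∈ d.items := by
    simp only [Prod.mk.eta]; exact List.getElem_mem h1
  have hm2 : (d'.items[i].1, d'.items[i].2) ∈ d'.items := by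
    simp only [Prod.mk.eta]; exact List.getElem_mem h2
  have g1 := PySem.Dict.get?_of_mem_items d hm1 hn
  have g2 := PySem.Dict.get?_of_mem_items d' hm2 hn'
  have : some d.items[i].2 = some d'.items[i].2 := by
    rw [← g1, ← g2, hfst, hv]
  exact Prod.ext hfst (Option.some.injEq _ _ |>.mp this)

-- get? of B's reduce loop over a nodup-keyed groups dict
lemma nbGet (groups : PySem.Dict Int (List (Int × Int))) (w : List (Int × Int) → Int)
    (hn : groups.keys.Nodup) (n : Int) :
    (groups.items.foldl (fun d q => d.insert q.1 (w q.2)) PySem.Dict.empty).get? n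
      = (groups.get? n).map w := by
  have hfresh : ∀ q ∈ groups.items, (PySem.Dict.empty : PySem.Dict Int Int).contains q.1 = false := by
    intro q _; exact PySem.Dict.contains_empty _
  have hnodup : (groups.items.map (fun q => q.1)).Nodup := by
    simpa [PySem.Dict.keys] using hn
  have hitems := PySem.Dict.items_foldl_insert_fresh groups.items (fun q => q.1)
    (fun q => w q.2) PySem.Dict.empty hfresh hnodup
  have hnb : (groups.items.foldl (fun d q => d.insert q.1 (w q.2)) PySem.Dict.empty).keys.Nodup :=
    PySem.Dict.nodup_keys_foldl_insert_key groups.items (fun q => q.1) (fun _ q => w q.2)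
      PySem.Dict.empty (by simp)
  cases hg : groups.get? n with
  | none =>
    rw [PySem.Dict.get?_eq_none_iff_not_mem_keys] at hg
    rw [show Option.map w none = (none : Option Int) from rfl,
      PySem.Dict.get?_eq_none_iff_not_mem_keys]
    simp only [PySem.Dict.keys, hitems]
    intro hmem
    rcases List.mem_map.mp hmem with ⟨q, hq, hq1⟩
    rw [List.mem_append] at hq
    rcases hq with h | h
    · exact absurd h (by simp [PySem.Dict.empty])
    · rcases List.mem_map.mp h with ⟨r, hr, hr1⟩
      refine hg ?_
      have : r.1 ∈ groups.items.map Prod.fst := List.mem_map.mpr ⟨r, hr, rfl⟩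
      have h1 : r.1 = n := by
        have := congrArg Prod.fst hr1
        simpa [hq1] using this
      simpa [PySem.Dict.keys, h1] using this
  | some ps =>
    have hmem : (n, ps) ∈ groups.items := PySem.Dict.mem_items_of_get?_eq_some groups hg
    have : (n, w ps) ∈ (groups.items.foldl (fun d q => d.insert q.1 (w q.2)) PySem.Dict.empty).items := by
      rw [hitems]
      refine List.mem_append.mpr (Or.inr ?_)
      exact List.mem_map.mpr ⟨(n, ps), hmem, rfl⟩
    simpa using PySem.Dict.get?_of_mem_items _ this hnb


-- the heart: A's running-op dict over id_map = B's collect-then-reduce dict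
lemma side_eq (op : Int → Int → Int) (hop : ∀ b, op b b = b)
    (red : List Int → Int) (hred : ∀ (b : Int) (bs : List Int), red (b :: bs) = bs.foldl op b)
    (sel : Int × Int → Int) (mk : Int × Int → Int × Int) (l : List (Int × Int)) :
    (l.foldl (fun d p => d.insert p.2 (op (d.getD p.2 (sel (mk p))) (sel (mk p))))
        (PySem.Dict.empty : PySem.Dict Int Int))
      = ((l.foldl (fun g p => g.modify p.2 [] (fun ps => ps ++ [mk p]))
            (PySem.Dict.empty : PySem.Dict Int (List (Int × Int)))).items.foldl
          (fun d q => d.insert q.1 (red (q.2.map sel))) PySem.Dict.empty) := by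
  set groups := l.foldl (fun g p => g.modify p.2 [] (fun ps => ps ++ [mk p]))
      (PySem.Dict.empty : PySem.Dict Int (List (Int × Int))) with hgroups
  have hgk : groups.keys = PySem.Set.ofList (l.map (fun p => p.2)) := by
    rw [hgroups, PySem.Dict.keys_foldl_modify_key l (fun p => p.2) []
      (fun _ p => (fun ps => ps ++ [mk p]))]
    rfl
  have hgn : groups.keys.Nodup := by rw [hgk]; exact PySem.Set.nodup_ofList _
  have hps : ∀ n : Int, groups.getD n [] = (l.filter (fun p => p.2 == n)).map mk := by
    intro n
    rw [hgroups, show (l.foldl (fun g p => g.modify p.2 [] (fun ps => ps ++ [mk p]))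
        (PySem.Dict.empty : PySem.Dict Int (List (Int × Int))))
      = ((l.map (fun p => (p.2, mk p))).foldl (fun g q => g.modify q.1 [] (fun ps => ps ++ [q.2]))
        PySem.Dict.empty) from (List.foldl_map (f := fun p => ((p.2 : Int), mk p))
          (g := fun (g : PySem.Dict Int (List (Int × Int))) q =>
            g.modify q.1 [] (fun ps => ps ++ [q.2]))).symm]
    rw [PySem.Dict.getD_foldl_modify_append]
    rw [List.filter_map]
    simp only [Function.comp_def, List.map_map]
    rfl
  apply PySem.Dict.ext
  apply items_eq_of
  · -- keys equal
    rw [PySem.Dict.keys_foldl_insert_key l (fun p => p.2)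
      (fun d p => op (d.getD p.2 (sel (mk p))) (sel (mk p)))]
    rw [PySem.Dict.keys_foldl_insert_key groups.items (fun q => q.1)
      (fun _ q => red (q.2.map sel))]
    show PySem.Set.ofList (l.map (fun p => p.2)) = PySem.Set.ofList (groups.items.map (fun q => q.1))
    rw [show groups.items.map (fun q => q.1) = groups.keys from rfl, hgk,
      PySem.Set.ofList_eq_self_of_nodup _ (PySem.Set.nodup_ofList _)]

  · -- nodup
    rw [PySem.Dict.keys_foldl_insert_key l (fun p => p.2)
      (fun d p => op (d.getD p.2 (sel (mk p))) (sel (mk p)))]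
    exact PySem.Set.nodup_ofList _

  · -- get? agree
    intro n
    rw [foldA_get? op (fun p => sel (mk p)) l PySem.Dict.empty n,
      nbGet groups (fun ps => red (ps.map sel)) hgn n]
    cases hg : groups.get? n with
    | none =>
      have hnk : n ∉ groups.keys := (PySem.Dict.get?_eq_none_iff_not_mem_keys _ _).mp hg
      have hfil : l.filter (fun p => p.2 == n) = [] := by
        rw [List.filter_eq_nil_iff]
        intro p hp hpn
        exact hnk (by
          rw [hgk]
          exact (PySem.Set.mem_ofList _ _).mpr (List.mem_map.mpr ⟨p, hp, by simpa using hpn⟩))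
      simp [hfil, PySem.Dict.get?_empty]
    | some ps =>
      have hps' : ps = (l.filter (fun p => p.2 == n)).map mk := by
        rw [← hps n]; exact (PySem.Dict.getD_of_get?_eq_some groups [] hg).symm
      have hnk : n ∈ groups.keys := by
        by_contra hc
        rw [← PySem.Dict.get?_eq_none_iff_not_mem_keys] at hc
        rw [hc] at hg; simp at hg
      obtain ⟨p0, hp0, hp02⟩ : ∃ p ∈ l, p.2 = n := by
        rw [hgk] at hnk
        rcases List.mem_map.mp ((PySem.Set.mem_ofList _ _).mp hnk) with ⟨p, hp, hpe⟩
        exact ⟨p, hp, hpe⟩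
      cases hfil : l.filter (fun p => p.2 == n) with
      | nil =>
        exact absurd (List.filter_eq_nil_iff.mp hfil p0 hp0) (by simpa using hp02)
      | cons q qs =>
        rw [hfil] at hps'
        rw [hps']
        simp only [List.map_cons, Option.map_some]
        rw [PySem.Dict.get?_empty, optfold_none op hop]
        simp [List.map_map, hred, Function.comp_def]

-- ===== VERDICT (by name: the statement is the Claim_ definition above) =====
theorem apply_id_map_spec : Claim_equal_apply_id_map := by
  intro track_birth track_death id_map _
  show apply_id_map track_birth track_death id_map = apply_id_map_alt track_birth track_death id_map
  simp only [apply_id_map, apply_id_map_alt]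
  set tbd := PySem.Dict.ofList track_birth with htbd
  set tdd := PySem.Dict.ofList track_death with htdd
  set imd := PySem.Dict.ofList id_map with himd
  have hredmin : ∀ (b : Int) (bs : List Int),
      (fun bs => (PySem.List.min? bs (fun y => y)).getD 0) (b :: bs) = bs.foldl min b := by
    intro b bs
    show (PySem.List.min? (b :: bs) (fun y => y)).getD 0 = bs.foldl min b
    rw [PySem.List.min?_id_cons]; rfl
  have hredmax : ∀ (b : Int) (bs : List Int),
      (fun bs => (PySem.List.max? bs (fun y => y)).getD 0) (b :: bs) = bs.foldl max b := by
    intro b bs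
    show (PySem.List.max? (b :: bs) (fun y => y)).getD 0 = bs.foldl max b
    rw [PySem.List.max?_id_cons]; rfl
  have hsplit : imd.items.foldl
      (fun (s : PySem.Dict Int Int × PySem.Dict Int Int) p =>
        (s.1.insert p.2 (min (s.1.getD p.2 (tbd.getD p.1 0)) (tbd.getD p.1 0)),
         s.2.insert p.2 (max (s.2.getD p.2 (tdd.getD p.1 0)) (tdd.getD p.1 0))))
      (PySem.Dict.empty, PySem.Dict.empty)
      = (imd.items.foldl (fun d p => d.insert p.2 (min (d.getD p.2 (tbd.getD p.1 0)) (tbd.getD p.1 0)))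
          PySem.Dict.empty,
         imd.items.foldl (fun d p => d.insert p.2 (max (d.getD p.2 (tdd.getD p.1 0)) (tdd.getD p.1 0)))
          PySem.Dict.empty) :=
    foldl_pair imd.items
      (fun d p => d.insert p.2 (min (d.getD p.2 (tbd.getD p.1 0)) (tbd.getD p.1 0)))
      (fun d p => d.insert p.2 (max (d.getD p.2 (tdd.getD p.1 0)) (tdd.getD p.1 0)))
      PySem.Dict.empty PySem.Dict.empty
  have hb : (imd.items.foldl (fun d p => d.insert p.2 (min (d.getD p.2 (tbd.getD p.1 0)) (tbd.getD p.1 0)))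
        PySem.Dict.empty)
      = ((imd.items.foldl
            (fun g p => g.modify p.2 [] (fun ps => ps ++ [(tbd.getD p.1 0, tdd.getD p.1 0)]))
            PySem.Dict.empty).items.foldl
          (fun d q => d.insert q.1 ((PySem.List.min? (q.2.map (fun r => r.1)) (fun y => y)).getD 0))
          PySem.Dict.empty) :=
    side_eq min (fun b => min_self b) (fun bs => (PySem.List.min? bs (fun y => y)).getD 0) hredmin
      (fun r => r.1) (fun p => (tbd.getD p.1 0, tdd.getD p.1 0)) imd.items
  have hd : (imd.items.foldl (fun d p => d.insert p.2 (max (d.getD p.2 (tdd.getD p.1 0)) (tdd.getD p.1 0)))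
        PySem.Dict.empty)
      = ((imd.items.foldl
            (fun g p => g.modify p.2 [] (fun ps => ps ++ [(tbd.getD p.1 0, tdd.getD p.1 0)]))
            PySem.Dict.empty).items.foldl
          (fun d q => d.insert q.1 ((PySem.List.max? (q.2.map (fun r => r.2)) (fun y => y)).getD 0))
          PySem.Dict.empty) :=
    side_eq max (fun b => max_self b) (fun bs => (PySem.List.max? bs (fun y => y)).getD 0) hredmax
      (fun r => r.2) (fun p => (tbd.getD p.1 0, tdd.getD p.1 0)) imd.items
  rw [hsplit, hb, hd]
  have hpass : ∀ (s : PySem.Dict Int Int × PySem.Dict Int Int),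
      tbd.keys.foldl
        (fun s tid =>
          if imd.contains tid then s
          else (s.1.insert tid (tbd.getD tid 0),
                s.2.insert tid (tdd.getD tid (tbd.getD tid 0)))) s
      = tbd.items.foldl
        (fun s p =>
          if imd.contains p.1 then s
          else (s.1.insert p.1 p.2, s.2.insert p.1 (tdd.getD p.1 p.2))) s := by
    intro s
    rw [show tbd.keys = tbd.items.map (fun p => p.1) from rfl, List.foldl_map]
    refine PySem.List.foldl_congr_mem _ _ _ _ ?_
    intro acc p hp
    have h2 : tbd.getD p.1 0 = p.2 :=
      PySem.Dict.getD_of_mem_items tbd (k := p.1) (v := p.2) hp (PySem.Dict.nodup_keys_ofList _) 0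
    simp [h2]
  rw [hpass]
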